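-- pv_equiv track=rewrite | github.com/yanptang/OpenTravel | 02.LocalAgentCLI/opentravel/planner.py | _remaining_must_do
-- ===== SOURCE A (Python) =====
-- def _remaining_must_do(must_do: list[str], covered_texts: list[str]) -> list[str]:
--     # 已覆盖的 must-do 不再重复分配给后续天。
--     merged = " ".join(covered_texts).lower()
--     remaining: list[str] = []
--     for item in must_do:
--         item_text = item.lower().strip()
--         if item_text and item_text in merged:
--             continue
--         remaining.append(item)
--     return remaining
-- ===== SOURCE B (Python) =====
-- def _remaining_must_do(must_do: list[str], covered_texts: list[str]) -> list[str]:
--     # n-gram index: for each distinct needle length L, the set of all L-grams of the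
--     # merged text is built once; each item then costs one set lookup instead of a scan.
--     merged = " ".join(covered_texts).lower()
--     grams: dict[int, set[str]] = {}
--
--     def is_covered(item: str) -> bool:
--         t = item.lower().strip()
--         if not t:
--             return False
--         g = grams.get(len(t))
--         if g is None:
--             g = {merged[i:i + len(t)] for i in range(len(merged) - len(t) + 1)}
--             grams[len(t)] = g
--         return t in g
--
--     return [item for item in must_do if not is_covered(item)]
-- ===== Notes on version B (the rewrite author's own statement) =====
-- stated objective: faster
-- what changed: B replaces A's per-item substring scan over the merged text by an n-gram index: for each distinct needle length L it builds the set of all L-grams of the merged text once, so every item costs one set lookup instead of a scan.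
import Mathlib
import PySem

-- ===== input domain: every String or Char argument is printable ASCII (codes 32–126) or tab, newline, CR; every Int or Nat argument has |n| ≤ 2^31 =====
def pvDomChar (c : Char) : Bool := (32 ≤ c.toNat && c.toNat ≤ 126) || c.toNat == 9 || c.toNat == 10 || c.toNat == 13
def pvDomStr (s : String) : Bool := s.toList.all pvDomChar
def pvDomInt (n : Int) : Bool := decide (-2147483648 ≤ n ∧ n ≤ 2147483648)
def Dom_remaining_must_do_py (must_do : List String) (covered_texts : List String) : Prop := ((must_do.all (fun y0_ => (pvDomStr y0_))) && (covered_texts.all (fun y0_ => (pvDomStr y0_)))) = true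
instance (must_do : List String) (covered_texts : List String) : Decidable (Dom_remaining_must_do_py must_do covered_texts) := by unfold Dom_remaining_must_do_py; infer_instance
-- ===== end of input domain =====

-- B replaces A's per-item substring scan by an n-gram index: for each distinct needle
-- length the set of all substrings of that length of the merged text is built once,
-- so each item costs one set lookup; proved equal to A on all inputs.

-- ===== PORT A =====
def remaining_must_do_py (must_do : List String) (covered_texts : List String) : List String :=
  let merged := PySem.Str.lower (PySem.Str.join " " covered_texts)
  must_do.foldl (fun remaining item =>
    let item_text := PySem.Str.strip (PySem.Str.lower item)
    if item_text ≠ "" ∧ PySem.Str.isIn item_text merged = true then remaining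
    else remaining ++ [item]) []

-- ===== PORT B =====
-- the set comprehension {merged[i:i+L] for i in range(len(merged)-L+1)}
def pvGrams (merged : List Char) (L : Int) : PySem.Set (List Char) :=
  PySem.Set.ofList ((PySem.List.pyRange 0 ((merged.length : Int) - L + 1) 1).map
    (fun i => PySem.List.slice merged (some i) (some (i + L))))

-- one item of B's filtering comprehension: is_covered(item), threading the stateful
-- grams dict; state = (grams dict, output list so far)
def pvAltStep (merged : List Char) (st : PySem.Dict Int (PySem.Set (List Char)) × List String)
    (item : String) : PySem.Dict Int (PySem.Set (List Char)) × List String :=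
  let t := PySem.Chars.strip (PySem.Chars.lower item.toList)
  if t = [] then (st.1, st.2 ++ [item])
  else
    let L : Int := t.length
    match PySem.Dict.get? st.1 L with
    | some g => if PySem.Set.contains g t then (st.1, st.2) else (st.1, st.2 ++ [item])
    | none =>
      let g := pvGrams merged L
      if PySem.Set.contains g t then (PySem.Dict.insert st.1 L g, st.2)
      else (PySem.Dict.insert st.1 L g, st.2 ++ [item])

def remaining_must_do_py_alt (must_do : List String) (covered_texts : List String) : List String :=
  let merged := PySem.Chars.lower (PySem.Chars.join (" ".toList) (covered_texts.map String.toList))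
  (must_do.foldl (pvAltStep merged) (PySem.Dict.empty, [])).2

-- ===== PRECONDITION & SPEC =====
def Spec_remaining_must_do_py (must_do : List String) (covered_texts : List String) (out : List String) : Prop := out = remaining_must_do_py_alt must_do covered_texts
instance (must_do : List String) (covered_texts : List String) (out : List String) : Decidable (Spec_remaining_must_do_py must_do covered_texts out) := by unfold Spec_remaining_must_do_py; infer_instance

-- ===== CLAIM (what is proved, stated in full; the proofs are below) =====
def Claim_equal_remaining_must_do_py : Prop := ∀ (must_do : List String) (covered_texts : List String), Dom_remaining_must_do_py must_do covered_texts → Spec_remaining_must_do_py must_do covered_texts (remaining_must_do_py must_do covered_texts)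

-- ===== LEMMAS AND PROOFS =====

-- membership in the length-|t| gram set of m is exactly substring occurrence ('t in m')
theorem pvGrams_mem (m t : List Char) (ht : t ≠ []) :
    (PySem.Set.contains (pvGrams m ((t.length : Int))) t = true) ↔
      PySem.Chars.isIn t m = true := by
  rw [PySem.Set.contains_iff]
  unfold pvGrams
  rw [PySem.Set.mem_ofList, ← PySem.Chars.exists_prefix_drop_iff_isIn, List.mem_map]
  constructor
  · rintro ⟨i, hi, hslice⟩
    rw [PySem.List.mem_pyRange_one] at hi
    obtain ⟨j, rfl⟩ := Int.eq_ofNat_of_zero_le hi.1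
    rw [PySem.List.slice_natCast_add] at hslice
    exact ⟨j, hslice ▸ List.take_prefix _ _⟩
  · rintro ⟨j, hpref⟩
    have hlen : t.length ≤ (m.drop j).length := hpref.length_le
    have htpos : 0 < t.length := List.length_pos_iff.mpr ht
    rw [List.length_drop] at hlen
    refine ⟨(j : Int), ?_, ?_⟩
    · rw [PySem.List.mem_pyRange_one]
      constructor
      · exact Int.natCast_nonneg j
      · omega
    · rw [PySem.List.slice_natCast_add]
      exact (List.prefix_iff_eq_take.mp hpref).symm

-- the loop invariant: every value stored in the grams dict is the gram set of its key,
-- and then B's fold computes exactly A's fold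
theorem pvAlt_loop (m : String) (items : List String) :
    ∀ (d : PySem.Dict Int (PySem.Set (List Char))) (rem : List String),
    (∀ L g, PySem.Dict.get? d L = some g → g = pvGrams m.toList L) →
    (items.foldl (pvAltStep m.toList) (d, rem)).2 =
      items.foldl (fun remaining item =>
        let item_text := PySem.Str.strip (PySem.Str.lower item)
        if item_text ≠ "" ∧ PySem.Str.isIn item_text m = true then remaining
        else remaining ++ [item]) rem := by
  induction items with
  | nil => intro d rem _; rfl
  | cons item rest ih =>
    intro d rem hinv
    simp only [List.foldl_cons]
    obtain ⟨t, hts⟩ : ∃ t, PySem.Chars.strip (PySem.Chars.lower item.toList) = t := ⟨_, rfl⟩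
    have htL : (PySem.Str.strip (PySem.Str.lower item)).toList = t := by rw [← hts]; simp
    by_cases h0 : t = []
    · have hstr : PySem.Str.strip (PySem.Str.lower item) = "" :=
        String.toList_eq_nil_iff.mp (htL.trans h0)
      have hstep : pvAltStep m.toList (d, rem) item = (d, rem ++ [item]) := by
        simp [pvAltStep, hts, h0]
      rw [hstep, ih d (rem ++ [item]) hinv]
      simp [hstr]
    · have hstr : PySem.Str.strip (PySem.Str.lower item) ≠ "" := by
        intro h; apply h0; rw [← htL, h]; rfl
      have hIn : PySem.Str.isIn (PySem.Str.strip (PySem.Str.lower item)) m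
          = PySem.Chars.isIn t m.toList := by rw [← htL]; simp
      have hcond : (PySem.Str.strip (PySem.Str.lower item) ≠ "" ∧
          PySem.Str.isIn (PySem.Str.strip (PySem.Str.lower item)) m = true)
          ↔ PySem.Chars.isIn t m.toList = true := by
        rw [hIn]; simp [hstr]
      cases hget : PySem.Dict.get? d ((t.length : Int)) with
      | some g =>
        have hg : g = pvGrams m.toList ((t.length : Int)) := hinv _ _ hget
        have hcg : (PySem.Set.contains g t = true) ↔ PySem.Chars.isIn t m.toList = true := by
          rw [hg]; exact pvGrams_mem m.toList t h0
        by_cases hc : PySem.Set.contains g t = true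
        · have hc' : t ∈ g := by rw [← PySem.Set.contains_iff]; exact hc
          have hstep : pvAltStep m.toList (d, rem) item = (d, rem) := by
            simp [pvAltStep, hts, h0, hget, hc']
          rw [hstep, ih d rem hinv, if_pos (hcond.mpr (hcg.mp hc))]
        · have hc' : t ∉ g := by rw [← PySem.Set.contains_iff]; exact hc
          have hstep : pvAltStep m.toList (d, rem) item = (d, rem ++ [item]) := by
            simp [pvAltStep, hts, h0, hget, hc']
          rw [hstep, ih d (rem ++ [item]) hinv,
            if_neg (fun h => hc (hcg.mpr (hcond.mp h)))]
      | none =>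
        have hinv' : ∀ L g, PySem.Dict.get?
            (PySem.Dict.insert d ((t.length : Int)) (pvGrams m.toList ((t.length : Int)))) L = some g →
            g = pvGrams m.toList L := by
          intro L g hLg
          rw [PySem.Dict.get?_insert] at hLg
          split at hLg
          · rename_i hL; cases hLg; rw [hL]
          · exact hinv _ _ hLg
        have hcg : (PySem.Set.contains (pvGrams m.toList ((t.length : Int))) t = true)
            ↔ PySem.Chars.isIn t m.toList = true := pvGrams_mem m.toList t h0
        by_cases hc : PySem.Set.contains (pvGrams m.toList ((t.length : Int))) t = true
        · have hc' : t ∈ pvGrams m.toList ((t.length : Int)) := by rw [← PySem.Set.contains_iff]; exact hc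
          have hstep : pvAltStep m.toList (d, rem) item
              = (PySem.Dict.insert d ((t.length : Int)) (pvGrams m.toList ((t.length : Int))), rem) := by
            simp [pvAltStep, hts, h0, hget, hc']
          rw [hstep, ih _ rem hinv', if_pos (hcond.mpr (hcg.mp hc))]
        · have hc' : t ∉ pvGrams m.toList ((t.length : Int)) := by rw [← PySem.Set.contains_iff]; exact hc
          have hstep : pvAltStep m.toList (d, rem) item
              = (PySem.Dict.insert d ((t.length : Int)) (pvGrams m.toList ((t.length : Int))), rem ++ [item]) := by
            simp [pvAltStep, hts, h0, hget, hc']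
          rw [hstep, ih _ (rem ++ [item]) hinv',
            if_neg (fun h => hc (hcg.mpr (hcond.mp h)))]

-- ===== VERDICT (by name: the statement is the Claim_ definition above) =====
theorem remaining_must_do_py_spec : Claim_equal_remaining_must_do_py := by
  intro must_do covered_texts _
  unfold Spec_remaining_must_do_py remaining_must_do_py remaining_must_do_py_alt
  have hm : PySem.Chars.lower (PySem.Chars.join (" ".toList) (covered_texts.map String.toList))
      = (PySem.Str.lower (PySem.Str.join " " covered_texts)).toList := by simp
  rw [hm]
  rw [pvAlt_loop (PySem.Str.lower (PySem.Str.join " " covered_texts)) must_do PySem.Dict.empty []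
    (by intro L g h; simp [PySem.Dict.get?_empty] at h)]
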